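-- pv_equiv track=rewrite | github.com/CocoMarck/modulosUtilPy | Modulos/Modulo_Util.py | Text_Separe
-- ===== SOURCE A (Python) =====
-- def Text_Separe(text='', text_separe='='):
--     '''Para separar el texto en 2 y almacenarlo en un diccionario'''
--
--     text_dict = {}
--     if (
--         '\n' in text and
--         text_separe in text
--     ):
--         # Cuando hay saltos de linea y separador
--         for line in text.split('\n'):
--             line = Text_Separe(text=line, text_separe=text_separe)
--             for key in line.keys():
--                 text_dict.update( {key : line[key]} )
--
--     elif text_separe in text:
--         # Cuando solo hay separador
--         text = text.split(text_separe)
--         text_dict.update( {text[0] : text[1]} )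
--     else:
--         pass
--
--     return text_dict
-- ===== SOURCE B (Python) =====
-- def Text_Separe(text='', text_separe='='):
--     '''Para separar el texto en 2 y almacenarlo en un diccionario'''
--     text_dict = {}
--     for line in text.split('\n'):
--         if text_separe in line:
--             parts = line.split(text_separe)
--             text_dict[parts[0]] = parts[1]
--     return text_dict
-- ===== Notes on version B (the rewrite author's own statement) =====
-- stated objective: simpler
-- what changed: Replaces A's self-recursion with nested newline/separator containment checks by one flat loop over the list of lines of text that splits each line containing the separator and assigns the first piece to the second.
import Mathlib
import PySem

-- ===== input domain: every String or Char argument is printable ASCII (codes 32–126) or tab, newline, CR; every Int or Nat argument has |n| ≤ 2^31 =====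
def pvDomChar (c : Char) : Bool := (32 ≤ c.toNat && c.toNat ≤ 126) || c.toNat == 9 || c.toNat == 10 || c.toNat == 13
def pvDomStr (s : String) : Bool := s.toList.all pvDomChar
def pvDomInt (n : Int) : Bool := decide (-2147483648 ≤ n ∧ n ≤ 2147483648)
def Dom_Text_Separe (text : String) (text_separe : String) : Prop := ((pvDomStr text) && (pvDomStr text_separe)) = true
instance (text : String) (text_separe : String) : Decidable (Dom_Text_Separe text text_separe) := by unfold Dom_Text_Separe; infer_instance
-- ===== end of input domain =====

-- B replaces A's self-recursion by one flat loop over the lines of text; equivalence of return values, proved for text_separe ≠ "".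

-- ===== PORT A =====
-- termination helper for the recursive port: each piece of split('\n') contains no '\n'
theorem pvGoNotMem (c : Char) : ∀ (fuel : Nat) (l cur : List Char) (acc : List (List Char)),
    l.length < fuel → (∀ q ∈ acc, c ∉ q) → c ∉ cur →
    ∀ p ∈ PySem.Chars.splitOn.go [c] fuel l cur acc, c ∉ p := by
  intro fuel
  induction fuel with
  | zero => intro l cur acc h; omega
  | succ f ih =>
    intro l cur acc hlen hacc hcur p hp
    match l with
    | [] =>
      simp only [PySem.Chars.splitOn.go] at hp
      simp only [List.mem_reverse, List.mem_cons] at hp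
      rcases hp with h | h
      · subst h; simpa using hcur
      · exact hacc _ h
    | c' :: rest =>
      simp only [PySem.Chars.splitOn.go] at hp
      by_cases hpre : [c].isPrefixOf (c' :: rest) = true
      · rw [if_pos hpre] at hp
        refine ih _ [] (cur.reverse :: acc) ?_ ?_ (by simp) p hp
        · simp at hlen ⊢; omega
        · intro q hq
          rcases List.mem_cons.mp hq with h | h
          · subst h; simpa using hcur
          · exact hacc _ h
      · rw [if_neg hpre] at hp
        have hc : c ≠ c' := by
          intro h; subst h
          simp [List.isPrefixOf] at hpre
        refine ih rest (c' :: cur) acc (by simp at hlen ⊢; omega) hacc ?_ p hp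
        intro h
        rcases List.mem_cons.mp h with h | h
        · exact hc h
        · exact hcur h

theorem pvSplitOnNotMem (c : Char) (s : List Char) :
    ∀ p ∈ PySem.Chars.splitOn s [c], c ∉ p := by
  intro p hp
  exact pvGoNotMem c (s.length + 1) s [] [] (by omega) (by simp) (by simp) p hp

def TSdict (text : String) (text_separe : String) : PySem.Dict String String :=
  if h : (PySem.Str.isIn "\n" text && PySem.Str.isIn text_separe text) = true then
    -- for line in text.split('\n'): line = Text_Separe(line, …); for key in line.keys(): text_dict.update({key: line[key]})
    ((PySem.Str.split? text "\n").getD []).attach.foldl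
      (fun d p =>
        let ld := TSdict p.1 text_separe
        ld.keys.foldl (fun d key => d.insert key (ld.getD key "")) d)
      PySem.Dict.empty
  else if PySem.Str.isIn text_separe text then
    -- text = text.split(text_separe); text_dict.update({text[0] : text[1]})
    let parts := (PySem.Str.split? text text_separe).getD []
    PySem.Dict.empty.insert (parts.getD 0 "") (parts.getD 1 "")
  else
    PySem.Dict.empty
termination_by text.toList.count '\n'
decreasing_by
  have hsplit : (PySem.Str.split? text "\n").getD [] = (PySem.Chars.splitOn text.toList ['\n']).map String.ofList := by
    simp [PySem.Str.split?, PySem.Chars.split?]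
  have hmem' : p.1 ∈ (PySem.Chars.splitOn text.toList ['\n']).map String.ofList := by
    rw [← hsplit]; exact p.2
  rcases List.mem_map.mp hmem' with ⟨cs, hcs, hof⟩
  have hnot : '\n' ∉ cs := pvSplitOnNotMem '\n' text.toList cs hcs
  have hpl : p.1.toList = cs := by rw [← hof]; exact String.toList_ofList
  have h0 : p.1.toList.count '\n' = 0 := by rw [hpl]; exact List.count_eq_zero.mpr hnot
  have h1 : (PySem.Str.isIn "\n" text) = true := by
    exact (Bool.and_eq_true_iff.mp h).1
  have h2 : '\n' ∈ text.toList := by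
    have := (PySem.Str.isIn_iff_infix "\n" text).mp h1
    simpa using (List.singleton_infix_iff '\n' text.toList).mp (by simpa using this)
  have h3 : 1 ≤ text.toList.count '\n' := List.one_le_count_iff.mpr h2
  omega

def Text_Separe (text : String) (text_separe : String) : List (String × String) :=
  (TSdict text text_separe).items

-- ===== PORT B =====
def Text_Separe_alt (text : String) (text_separe : String) : List (String × String) :=
  (((PySem.Str.split? text "\n").getD []).foldl
    (fun d line =>
      if PySem.Str.isIn text_separe line then
        let parts := (PySem.Str.split? line text_separe).getD []
        d.insert (parts.getD 0 "") (parts.getD 1 "")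
      else d)
    (PySem.Dict.empty : PySem.Dict String String)).items

-- ===== PRECONDITION & SPEC =====
-- Pre_ excludes exactly an empty text_separe, on which str.split with an empty separator raises ValueError in A (and in B).
def Pre_Text_Separe (text : String) (text_separe : String) : Prop := text_separe ≠ ""
instance (text : String) (text_separe : String) : Decidable (Pre_Text_Separe text text_separe) := by unfold Pre_Text_Separe; infer_instance
def pvWitness_Text_Separe : String × String := ("a=b\nc=d", "=")

def Spec_Text_Separe (text : String) (text_separe : String) (out : List (String × String)) : Prop := out = Text_Separe_alt text text_separe
instance (text : String) (text_separe : String) (out : List (String × String)) : Decidable (Spec_Text_Separe text text_separe out) := by unfold Spec_Text_Separe; infer_instance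

-- ===== CLAIM (what is proved, stated in full; the proofs are below) =====
def Claim_equal_Text_Separe : Prop := ∀ (text : String) (text_separe : String), Dom_Text_Separe text text_separe → Pre_Text_Separe text text_separe → Spec_Text_Separe text text_separe (Text_Separe text text_separe)

-- ===== LEMMAS AND PROOFS =====
-- every piece of split('\n') is an infix of the original (so a separator absent from text is absent from every line)
theorem pvGoInfix (c : Char) (s : List Char) : ∀ (fuel : Nat) (l cur : List Char) (acc : List (List Char)),
    l.length < fuel → (cur.reverse ++ l) <:+: s → (∀ q ∈ acc, q <:+: s) →
    ∀ p ∈ PySem.Chars.splitOn.go [c] fuel l cur acc, p <:+: s := by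
  intro fuel
  induction fuel with
  | zero => intro l cur acc h; omega
  | succ f ih =>
    intro l cur acc hlen hcl hacc p hp
    match l with
    | [] =>
      simp only [PySem.Chars.splitOn.go] at hp
      simp only [List.mem_reverse, List.mem_cons] at hp
      rcases hp with h | h
      · subst h
        exact List.IsInfix.trans (by simp) hcl
      · exact hacc _ h
    | c' :: rest =>
      simp only [PySem.Chars.splitOn.go] at hp
      by_cases hpre : [c].isPrefixOf (c' :: rest) = true
      · rw [if_pos hpre] at hp
        have h1 : (List.drop [c].length (c' :: rest)).length < f := by
          simp at hlen ⊢; omega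
        have h2 : ([] : List Char).reverse ++ List.drop [c].length (c' :: rest) <:+: s := by
          have hsuf : rest <:+ cur.reverse ++ c' :: rest := ⟨cur.reverse ++ [c'], by simp⟩
          simpa using hsuf.isInfix.trans hcl
        have h3 : ∀ q ∈ cur.reverse :: acc, q <:+: s := by
          intro q hq
          rcases List.mem_cons.mp hq with h | h
          · subst h
            exact (List.prefix_append cur.reverse (c' :: rest)).isInfix.trans hcl
          · exact hacc _ h
        exact ih _ [] (cur.reverse :: acc) h1 h2 h3 p hp
      · rw [if_neg hpre] at hp
        have heq : (c' :: cur).reverse ++ rest = cur.reverse ++ c' :: rest := by simp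
        exact ih rest (c' :: cur) acc (by simp at hlen ⊢; omega) (heq ▸ hcl) hacc p hp

theorem pvSplitOnInfix (c : Char) (s : List Char) :
    ∀ p ∈ PySem.Chars.splitOn s [c], p <:+: s := by
  intro p hp
  exact pvGoInfix c s (s.length + 1) s [] [] (by omega) (by simp) (by simp) p hp

-- split('\n') of a newline-free string is the singleton
theorem pvGoNoSep (c : Char) : ∀ (fuel : Nat) (l cur : List Char) (acc : List (List Char)),
    l.length < fuel → c ∉ l →
    PySem.Chars.splitOn.go [c] fuel l cur acc = acc.reverse ++ [cur.reverse ++ l] := by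
  intro fuel
  induction fuel with
  | zero => intro l cur acc h; omega
  | succ f ih =>
    intro l cur acc hlen hnot
    match l with
    | [] => simp [PySem.Chars.splitOn.go]
    | c' :: rest =>
      have hne : c ≠ c' := fun h => hnot (h ▸ List.mem_cons_self ..)
      have hpre : [c].isPrefixOf (c' :: rest) = false := by
        simp [List.isPrefixOf, hne]
      simp only [PySem.Chars.splitOn.go, hpre, Bool.false_eq_true, if_false]
      rw [ih rest (c' :: cur) acc (by simp at hlen ⊢; omega)
        (fun h => hnot (List.mem_cons_of_mem _ h))]
      simp

theorem pvSplitOnNoSep (c : Char) (s : List Char) (h : c ∉ s) :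
    PySem.Chars.splitOn s [c] = [s] := by
  have := pvGoNoSep c (s.length + 1) s [] [] (by omega) h
  simpa [PySem.Chars.splitOn] using this

theorem pvLines_eq (text : String) :
    (PySem.Str.split? text "\n").getD [] = (PySem.Chars.splitOn text.toList ['\n']).map String.ofList := by
  simp [PySem.Str.split?, PySem.Chars.split?]

theorem pvIsIn_newline (s : String) : PySem.Str.isIn "\n" s = true ↔ '\n' ∈ s.toList := by
  rw [PySem.Str.isIn_iff_infix]
  simpa using List.singleton_infix_iff '\n' s.toList

-- the body A runs for one newline-free line equals B's body
theorem pvLineStep (line : String) (text_separe : String)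
    (hnl : '\n' ∉ line.toList) (d : PySem.Dict String String) :
    (TSdict line text_separe).keys.foldl
      (fun d key => d.insert key ((TSdict line text_separe).getD key "")) d
    = if PySem.Str.isIn text_separe line then
        let parts := (PySem.Str.split? line text_separe).getD []
        d.insert (parts.getD 0 "") (parts.getD 1 "")
      else d := by
  have hn : PySem.Str.isIn "\n" line = false := by
    rw [← Bool.not_eq_true]
    intro h
    exact hnl ((pvIsIn_newline line).mp h)
  rw [TSdict, dif_neg (by rw [hn]; simp)]
  by_cases hs : PySem.Str.isIn text_separe line = true
  · rw [if_pos hs, if_pos hs]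
    have hkeys : ((PySem.Dict.empty : PySem.Dict String String).insert
        (((PySem.Str.split? line text_separe).getD []).getD 0 "")
        (((PySem.Str.split? line text_separe).getD []).getD 1 "")).keys
          = [((PySem.Str.split? line text_separe).getD []).getD 0 ""] := by
      rw [PySem.Dict.keys_insert_of_not_contains _ _ (by rfl)]
      rfl
    rw [hkeys]
    simp only [List.foldl_cons, List.foldl_nil]
    rw [PySem.Dict.getD_insert_self]
  · rw [if_neg hs, if_neg hs]
    rfl

theorem pvLineFacts (text : String) (line : String)
    (h : line ∈ (PySem.Str.split? text "\n").getD []) :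
    '\n' ∉ line.toList ∧ line.toList <:+: text.toList := by
  rw [pvLines_eq] at h
  rcases List.mem_map.mp h with ⟨cs, hcs, hof⟩
  have heq : line.toList = cs := by rw [← hof]; exact String.toList_ofList
  constructor
  · rw [heq]; exact pvSplitOnNotMem _ _ _ hcs
  · rw [heq]; exact pvSplitOnInfix _ _ _ hcs

theorem pvDictEq (text : String) (text_separe : String) (_hsep : text_separe ≠ "") :
    TSdict text text_separe
      = ((PySem.Str.split? text "\n").getD []).foldl
          (fun d line =>
            if PySem.Str.isIn text_separe line then
              let parts := (PySem.Str.split? line text_separe).getD []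
              d.insert (parts.getD 0 "") (parts.getD 1 "")
            else d)
          (PySem.Dict.empty : PySem.Dict String String) := by
  by_cases hn : PySem.Str.isIn "\n" text = true
  · by_cases hs : PySem.Str.isIn text_separe text = true
    · rw [TSdict, dif_pos (by rw [hn, hs]; rfl)]
      have hA :
          (((PySem.Str.split? text "\n").getD []).attach.foldl
            (fun d p =>
              let ld := TSdict p.1 text_separe
              ld.keys.foldl (fun d key => d.insert key (ld.getD key "")) d)
            (PySem.Dict.empty : PySem.Dict String String))
          = ((PySem.Str.split? text "\n").getD []).foldl
            (fun d line =>
              (TSdict line text_separe).keys.foldl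
                (fun d key => d.insert key ((TSdict line text_separe).getD key "")) d)
            (PySem.Dict.empty : PySem.Dict String String) := List.foldl_attach
        (f := fun (d : PySem.Dict String String) (line : String) =>
          (TSdict line text_separe).keys.foldl
            (fun d key => d.insert key ((TSdict line text_separe).getD key "")) d)
      rw [hA]
      apply PySem.List.foldl_congr_mem
      intro acc line hline
      exact pvLineStep line text_separe (pvLineFacts text line hline).1 acc
    · rw [TSdict, dif_neg (fun hcontra => hs (Bool.and_eq_true_iff.mp hcontra).2), if_neg hs]
      rw [PySem.List.foldl_congr_mem _ _
        (fun (d : PySem.Dict String String) (_ : String) => d) _ ?_]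
      · exact (List.foldl_fixed _).symm
      · intro acc line hline
        have hno : PySem.Str.isIn text_separe line = false := by
          rw [← Bool.not_eq_true]
          intro h
          apply hs
          rw [PySem.Str.isIn_iff_infix] at h ⊢
          exact h.trans (pvLineFacts text line hline).2
        rw [if_neg (by rw [hno]; simp)]
  · have hnl : '\n' ∉ text.toList := fun h => hn ((pvIsIn_newline text).mpr h)
    have hlines : (PySem.Str.split? text "\n").getD [] = [text] := by
      rw [pvLines_eq, pvSplitOnNoSep '\n' text.toList hnl]
      simp [String.ofList_toList]
    rw [hlines]
    simp only [List.foldl_cons, List.foldl_nil]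
    rw [TSdict, dif_neg (fun hcontra => hn (Bool.and_eq_true_iff.mp hcontra).1)]

-- ===== VERDICT (by name: the statement is the Claim_ definition above) =====
theorem Text_Separe_spec : Claim_equal_Text_Separe := by
  intro text text_separe _ hpre
  unfold Spec_Text_Separe Text_Separe Text_Separe_alt
  rw [pvDictEq text text_separe hpre]
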